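-- pv_equiv track=rewrite | github.com/jonassibbesen/vgrna-project-paper | scripts/python/imprinting_analysis/make_plots.py | bin_values
-- ===== SOURCE A (Python) =====
-- import bisect
--
-- def bin_values(xs, bins):
--     assert(list(bins) == sorted(bins))
--     assert(len(bins) > 1)
--     counts = [0 for b in range(len(bins) - 1)]
--     for x in xs:
--         i = bisect.bisect(bins, x)
--         if i == 0:
--             i += 1
--         if i == len(bins):
--             i -= 1
--         counts[i - 1] += 1
--     return counts
-- ===== SOURCE B (Python) =====
-- def bin_values(xs, bins):
--     assert(list(bins) == sorted(bins))
--     assert(len(bins) > 1)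
--     counts = [0] * (len(bins) - 1)
--     j = 0
--     for x in sorted(xs):
--         while j < len(bins) and bins[j] <= x:
--             j += 1
--         i = j
--         if i == 0:
--             i = 1
--         if i == len(bins):
--             i = len(bins) - 1
--         counts[i - 1] += 1
--     return counts
-- ===== Notes on version B (the rewrite author's own statement) =====
-- stated objective: alternative
-- what changed: Replaces A's per-element bisect binary search over bins (in input order) with sorting a copy of xs once and sweeping a single monotone pointer through bins, exploiting that the bin index only grows as x grows.
import Mathlib
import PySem

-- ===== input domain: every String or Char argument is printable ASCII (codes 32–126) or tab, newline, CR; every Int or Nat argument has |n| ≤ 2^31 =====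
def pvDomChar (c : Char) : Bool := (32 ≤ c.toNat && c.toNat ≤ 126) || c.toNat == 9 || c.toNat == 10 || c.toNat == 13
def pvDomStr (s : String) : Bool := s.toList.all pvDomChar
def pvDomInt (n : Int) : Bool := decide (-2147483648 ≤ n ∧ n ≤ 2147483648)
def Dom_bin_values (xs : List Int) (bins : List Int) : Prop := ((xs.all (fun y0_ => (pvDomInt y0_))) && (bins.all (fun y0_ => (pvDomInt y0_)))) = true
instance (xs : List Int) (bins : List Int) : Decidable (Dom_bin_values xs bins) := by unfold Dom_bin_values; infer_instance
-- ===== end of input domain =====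

-- B replaces A's per-element binary search by one sort of xs plus a single monotone
-- pointer sweep through bins (same counts; objective: alternative decomposition).


-- ===== PORT A =====
-- loop body of A: i = bisect.bisect(bins, x) (= PySem.List.bisectRight), the two
-- clamps, then counts[i-1] += 1 (a read-then-set)
def pvStepA (bins : List Int) (counts : List Int) (x : Int) : List Int :=
  let i := PySem.List.bisectRight bins x
  let i := if i = 0 then i + 1 else i
  let i := if i = bins.length then i - 1 else i
  counts.set (i - 1) (counts.getD (i - 1) 0 + 1)

def bin_values (xs : List Int) (bins : List Int) : List Int :=
  xs.foldl (pvStepA bins) ((List.range (bins.length - 1)).map (fun _ => (0 : Int)))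

-- ===== PORT B =====
-- the inner 'while j < len(bins) and bins[j] <= x: j += 1' loop of Source B
def advanceJ (bins : List Int) (x : Int) (j : Nat) : Nat :=
  if j < bins.length ∧ bins.getD j 0 ≤ x then advanceJ bins x (j + 1) else j
termination_by bins.length - j
decreasing_by omega

-- loop body of Source B: advance the pointer, clamp, counts[i-1] += 1
def pvStepB (bins : List Int) (st : Nat × List Int) (x : Int) : Nat × List Int :=
  let j := advanceJ bins x st.1
  let i := if j = 0 then 1 else j
  let i := if i = bins.length then bins.length - 1 else i
  (j, st.2.set (i - 1) (st.2.getD (i - 1) 0 + 1))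

def bin_values_alt (xs : List Int) (bins : List Int) : List Int :=
  ((PySem.List.sorted xs (fun x => x) false).foldl (pvStepB bins)
    (0, List.replicate (bins.length - 1) (0 : Int))).2

-- ===== PRECONDITION & SPEC =====
-- Pre_ excludes exactly the inputs on which A's asserts raise AssertionError:
-- bins not ascending, or len(bins) < 2.
def Pre_bin_values (xs : List Int) (bins : List Int) : Prop :=
  List.Pairwise (· ≤ ·) bins ∧ 1 < bins.length
instance (xs : List Int) (bins : List Int) : Decidable (Pre_bin_values xs bins) := by unfold Pre_bin_values; infer_instance

def pvWitness_bin_values : List Int × List Int := ([0, 5, -2, 3], [0, 3, 10])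

def Spec_bin_values (xs : List Int) (bins : List Int) (out : List Int) : Prop := out = bin_values_alt xs bins
instance (xs : List Int) (bins : List Int) (out : List Int) : Decidable (Spec_bin_values xs bins out) := by unfold Spec_bin_values; infer_instance

-- ===== CLAIM (what is proved, stated in full; the proofs are below) =====
def Claim_equal_bin_values : Prop := ∀ (xs : List Int) (bins : List Int), Dom_bin_values xs bins → Pre_bin_values xs bins → Spec_bin_values xs bins (bin_values xs bins)

-- ===== LEMMAS AND PROOFS =====

-- the counts index a value x falls into, and the increment of one slot
def pvSlot (bins : List Int) (x : Int) : Nat :=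
  let i := PySem.List.bisectRight bins x
  let i := if i = 0 then i + 1 else i
  let i := if i = bins.length then i - 1 else i
  i - 1

def pvInc (c : List Int) (k : Nat) : List Int := c.set k (c.getD k 0 + 1)

theorem pvInc_comm (c : List Int) (a b : Nat) : pvInc (pvInc c a) b = pvInc (pvInc c b) a := by
  by_cases hab : a = b
  · subst hab; rfl
  · unfold pvInc
    rw [List.set_comm _ _ hab]
    congr 2
    · simp [List.getD, List.getElem?_set, hab]
    · simp [List.getD, List.getElem?_set, Ne.symm hab]

theorem pvStepA_eq (bins : List Int) :
    pvStepA bins = fun c x => pvInc c (pvSlot bins x) := rfl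

theorem bin_values_eq_foldl (xs bins : List Int) :
    bin_values xs bins
      = xs.foldl (fun c x => pvInc c (pvSlot bins x))
          (List.replicate (bins.length - 1) (0 : Int)) := by
  unfold bin_values
  rw [pvStepA_eq, show (List.range (bins.length - 1)).map (fun _ => (0 : Int))
        = List.replicate (bins.length - 1) (0 : Int) by
      simpa using (List.map_const (l := List.range (bins.length - 1)) (b := (0 : Int)))]

theorem advanceJ_eq (bins : List Int) (x : Int) (hs : List.Pairwise (· ≤ ·) bins) :
    ∀ (n j : Nat), bins.length - j ≤ n → j ≤ PySem.List.bisectRight bins x →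
      advanceJ bins x j = PySem.List.bisectRight bins x := by
  have hle := (PySem.List.bisectRight_spec bins x hs).1
  have h2 := (PySem.List.bisectRight_spec bins x hs).2.1
  have h3 := (PySem.List.bisectRight_spec bins x hs).2.2
  intro n
  induction n with
  | zero =>
    intro j hn hj
    rw [advanceJ, if_neg (by intro h; omega)]
    omega
  | succ n ih =>
    intro j hn hj
    rw [advanceJ]
    split
    · rename_i h
      obtain ⟨hjl, hbx⟩ := h
      rw [List.getD_eq_getElem _ _ hjl] at hbx
      have hjbr : j < PySem.List.bisectRight bins x := by
        by_contra hc
        have := h3 j hjl (by omega)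
        omega
      exact ih (j + 1) (by omega) (by omega)
    · rename_i h
      by_cases hjl : j < bins.length
      · have hbx : ¬ bins.getD j 0 ≤ x := fun hx => h ⟨hjl, hx⟩
        rw [List.getD_eq_getElem _ _ hjl] at hbx
        have : ¬ j < PySem.List.bisectRight bins x := by
          intro hlt; exact hbx (h2 j hjl hlt)
        omega
      · omega

theorem bisectRight_mono (bins : List Int) (hs : List.Pairwise (· ≤ ·) bins)
    {x y : Int} (hxy : x ≤ y) :
    PySem.List.bisectRight bins x ≤ PySem.List.bisectRight bins y := by
  by_contra hc
  push_neg at hc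
  have hlx := (PySem.List.bisectRight_spec bins x hs).1
  have h2x := (PySem.List.bisectRight_spec bins x hs).2.1
  have h3y := (PySem.List.bisectRight_spec bins y hs).2.2
  have hylen : PySem.List.bisectRight bins y < bins.length := by omega
  have hb1 := h2x _ hylen hc
  have hb2 := h3y _ hylen (Nat.le_refl _)
  omega

theorem pvStepB_eq (bins : List Int) (hs : List.Pairwise (· ≤ ·) bins)
    (st : Nat × List Int) (x : Int) (hj : st.1 ≤ PySem.List.bisectRight bins x) :
    pvStepB bins st x = (PySem.List.bisectRight bins x, pvInc st.2 (pvSlot bins x)) := by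
  simp only [pvStepB, advanceJ_eq bins x hs bins.length st.1 (by omega) hj]
  have : (if (if PySem.List.bisectRight bins x = 0 then 1 else PySem.List.bisectRight bins x) = bins.length
            then bins.length - 1
            else (if PySem.List.bisectRight bins x = 0 then 1 else PySem.List.bisectRight bins x)) - 1
          = pvSlot bins x := by
    simp only [pvSlot]
    split_ifs <;> omega
  rw [this]
  rfl

theorem foldB_eq (bins : List Int) (hs : List.Pairwise (· ≤ ·) bins) :
    ∀ (l : List Int), List.Pairwise (· ≤ ·) l →
      ∀ (j : Nat) (c : List Int),
      (∀ y ∈ l, j ≤ PySem.List.bisectRight bins y) →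
      (l.foldl (pvStepB bins) (j, c)).2
        = l.foldl (fun c x => pvInc c (pvSlot bins x)) c := by
  intro l
  induction l with
  | nil => intro _ _ _ _; rfl
  | cons x t ih =>
    intro hp j c hb
    obtain ⟨hx, ht⟩ := List.pairwise_cons.mp hp
    rw [List.foldl_cons, List.foldl_cons,
      pvStepB_eq bins hs (j, c) x (hb x (List.mem_cons_self))]
    exact ih ht _ _ (fun y hy => bisectRight_mono bins hs (hx y hy))

-- ===== VERDICT (by name: the statement is the Claim_ definition above) =====
theorem bin_values_spec : Claim_equal_bin_values := by
  intro xs bins _ hpre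
  obtain ⟨hs, _⟩ := hpre
  unfold Spec_bin_values bin_values_alt
  rw [bin_values_eq_foldl]
  rw [foldB_eq bins hs _ (by simpa using PySem.List.sorted_pairwise xs (fun x => x))
      0 _ (fun y _ => Nat.zero_le _)]
  exact @List.Perm.foldl_eq _ _ (fun c x => pvInc c (pvSlot bins x)) _ _
    ⟨fun c a b => pvInc_comm c (pvSlot bins a) (pvSlot bins b)⟩
    (PySem.List.sorted_perm xs (fun x => x) false).symm _
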